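-- pv_equiv track=rewrite | github.com/selfreferencing/erdos-86-lean | Zeroless/exp3_triple_constraint.py | zeroless_suffix_depth
-- ===== SOURCE A (Python) =====
-- def zeroless_suffix_depth(n):
--     """
--     How many trailing digits of n are all nonzero?
--     Returns the largest k such that the last k digits are all in {1,...,9}.
--     """
--     s = str(n)
--     depth = 0
--     for ch in reversed(s):
--         if ch == '0':
--             break
--         depth += 1
--     return depth
-- ===== SOURCE B (Python) =====
-- def zeroless_suffix_depth(n):
--     """
--     How many trailing digits of n are all nonzero?
--     Returns the largest k such that the last k digits are all in {1,...,9}.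
--     """
--     s = str(n)
--     run = 0
--     for ch in s:
--         run = 0 if ch == '0' else run + 1
--     return run
-- ===== Notes on version B (the rewrite author's own statement) =====
-- stated objective: alternative
-- what changed: Replaces A's reverse scan with early break by a single left-to-right pass that maintains the length of the current run of non-zero characters, resetting the counter at every zero character; the final run length is the answer.
import Mathlib
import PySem

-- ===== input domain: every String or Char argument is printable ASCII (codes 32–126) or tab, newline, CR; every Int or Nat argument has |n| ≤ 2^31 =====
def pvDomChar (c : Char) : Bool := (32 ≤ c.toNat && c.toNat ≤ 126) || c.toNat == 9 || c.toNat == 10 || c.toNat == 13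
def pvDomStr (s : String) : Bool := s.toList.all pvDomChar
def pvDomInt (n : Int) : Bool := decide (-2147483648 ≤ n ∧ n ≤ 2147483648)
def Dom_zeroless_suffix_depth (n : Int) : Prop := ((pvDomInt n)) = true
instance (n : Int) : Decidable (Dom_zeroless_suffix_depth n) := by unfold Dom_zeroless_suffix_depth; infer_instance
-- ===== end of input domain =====

-- B replaces A's reversed scan-with-break by one forward pass tracking the current run of non-'0' chars (alternative decomposition, same cost).


-- ===== PORT A =====
-- A's loop: for ch in reversed(s): if ch == '0': break; depth += 1
def pvDepthLoop : List Char → Int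
  | [] => 0
  | c :: r => if c = '0' then 0 else pvDepthLoop r + 1

def zeroless_suffix_depth (n : Int) : Int :=
  pvDepthLoop (PySem.Int.toStr n).toList.reverse

-- ===== PORT B =====
-- B's loop: for ch in s: run = 0 if ch == '0' else run + 1
def zeroless_suffix_depth_alt (n : Int) : Int :=
  (PySem.Int.toStr n).toList.foldl (fun run c => if c = '0' then 0 else run + 1) 0

-- ===== PRECONDITION & SPEC =====
def Spec_zeroless_suffix_depth (n : Int) (out : Int) : Prop := out = zeroless_suffix_depth_alt n
instance (n : Int) (out : Int) : Decidable (Spec_zeroless_suffix_depth n out) := by unfold Spec_zeroless_suffix_depth; infer_instance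

-- ===== CLAIM (what is proved, stated in full; the proofs are below) =====
def Claim_equal_zeroless_suffix_depth : Prop := ∀ (n : Int), Dom_zeroless_suffix_depth n → Spec_zeroless_suffix_depth n (zeroless_suffix_depth n)

-- ===== LEMMAS AND PROOFS =====
theorem pv_key (l : List Char) :
    pvDepthLoop l.reverse = l.foldl (fun run c => if c = '0' then 0 else run + 1) 0 := by
  induction l using List.reverseRecOn with
  | nil => simp [pvDepthLoop]
  | append_singleton l' c ih =>
      rw [List.reverse_append, List.foldl_append]
      simp only [List.reverse_singleton, List.singleton_append, pvDepthLoop, List.foldl]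
      by_cases h : c = '0'
      · simp [h]
      · simp [h, ih]

-- ===== VERDICT (by name: the statement is the Claim_ definition above) =====
theorem zeroless_suffix_depth_spec : Claim_equal_zeroless_suffix_depth := by
  intro n _
  unfold Spec_zeroless_suffix_depth zeroless_suffix_depth zeroless_suffix_depth_alt
  exact pv_key _
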